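-- pv_equiv track=rewrite | github.com/strzebon/algorithms-and-datastructures | dynamic_programming/12/zad12k.py | autostrada
-- ===== SOURCE A (Python) =====
-- def f(F, T, i, k):
--     #if i == -1: return 0
--     if F[i][k] != -1: return F[i][k]
--     minn = T[i]
--     for j in range(1,i+1):
--         minn = min(minn, max(f(F, T, j-1, k-1), T[i] - T[j-1]))
--     F[i][k] = minn
--     return F[i][k]
--
-- def autostrada( T, k ):
--     #Tutaj proszę wpisać własną implementację
--     n = len(T)
--     for i in range(1, n):
--         T[i] += T[i-1]
--
--     F = [[-1 for j in range(k+1)] for i in range(n)]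
--     for i in range(n):
--         F[i][0] = 10**10
--
--
--     return f(F, T, n-1, k)
-- ===== SOURCE B (Python) =====
-- def autostrada(T, k):
--     # Bottom-up layered DP (iterate the Bellman step to a fixpoint or k layers)
--     # instead of A's memoized recursion; does not mutate T.
--     n = len(T)
--     P = []
--     s = 0
--     for x in T:
--         s += x
--         P.append(s)
--     dp = [10 ** 10] * n
--     for _ in range(k):
--         new = [min([P[i]] + [max(dp[j - 1], P[i] - P[j - 1]) for j in range(1, i + 1)])
--                for i in range(n)]
--         if new == dp:
--             break
--         dp = new
--     return dp[n - 1]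
-- ===== Notes on version B (the rewrite author's own statement) =====
-- stated objective: alternative
-- what changed: A's top-down memoized recursion over a mutable n x (k+1) table (mutating T into prefix sums in place) is replaced by a bottom-up layered DP that iterates the one-layer Bellman step on a 1-D array, stopping early at a fixpoint; B does not mutate T.
import Mathlib
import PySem

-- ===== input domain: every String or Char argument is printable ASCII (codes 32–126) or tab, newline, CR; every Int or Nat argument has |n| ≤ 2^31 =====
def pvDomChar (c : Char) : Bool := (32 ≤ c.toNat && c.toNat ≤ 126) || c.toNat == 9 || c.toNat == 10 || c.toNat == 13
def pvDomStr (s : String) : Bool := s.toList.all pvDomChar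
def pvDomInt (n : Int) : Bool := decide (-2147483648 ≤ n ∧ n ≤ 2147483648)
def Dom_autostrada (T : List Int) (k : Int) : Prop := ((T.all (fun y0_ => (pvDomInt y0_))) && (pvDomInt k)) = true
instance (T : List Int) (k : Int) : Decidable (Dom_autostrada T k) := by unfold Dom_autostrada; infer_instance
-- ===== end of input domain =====

-- B replaces A's memoized top-down recursion by a bottom-up layered DP iterated to a
-- fixpoint (objective: alternative). A mutates its argument T in place (prefix sums);
-- the equivalence proved here is about the return value only (B does not mutate T).

-- ===== PORT A =====
-- A's in-place prefix-sum loop 'for i in range(1, n): T[i] += T[i-1]'.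
-- All indices the loop and the recursion touch are nonnegative and in range under
-- Pre_, so plain List.getD/List.set are exact here (defaults are never read).
def pyPrefixA (T : List Int) : List Int :=
  (List.range' 1 (T.length - 1)).foldl
    (fun acc i => acc.set i (acc.getD i 0 + acc.getD (i - 1) 0)) T

-- A's helper f(F, T, i, k), with the memo table F threaded as state.
def fA (P : List Int) : Nat → List (List Int) → Nat → Int × List (List Int)
  | 0, F, i =>
    -- Python: memo check; F[i][0] is initialized to 10^10 by autostrada, so the
    -- memo always hits here and the loop body is never reached at k = 0.
    ((F.getD i []).getD 0 (-1), F)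
  | k' + 1, F, i =>
    let cur := (F.getD i []).getD (k' + 1) (-1)
    if cur ≠ -1 then (cur, F)
    else
      let st := (List.range' 1 i).foldl
        (fun (st : Int × List (List Int)) j =>
          let r := fA P k' st.2 (j - 1)
          (min st.1 (max r.1 (P.getD i 0 - P.getD (j - 1) 0)), r.2))
        (P.getD i 0, F)
      let F2 := st.2.set i ((st.2.getD i []).set (k' + 1) st.1)
      ((F2.getD i []).getD (k' + 1) (-1), F2)

-- F = [[-1]*(k+1) for i in range(n)]; then F[i][0] = 10**10 for each i.
def initFA (n cols : Nat) : List (List Int) :=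
  (List.range n).foldl (fun F i => F.set i ((F.getD i []).set 0 (10 ^ 10)))
    (List.replicate n (List.replicate cols (-1)))

def autostrada (T : List Int) (k : Int) : Int :=
  let n := T.length
  let P := pyPrefixA T
  (fA P k.toNat (initFA n (k.toNat + 1)) (n - 1)).1

-- ===== PORT B =====
def prefB (s : Int) : List Int → List Int
  | [] => []
  | x :: xs => (s + x) :: prefB (s + x) xs

def stepB (P : List Int) (n : Nat) (dp : List Int) : List Int :=
  (List.range n).map (fun i =>
    (List.range' 1 i).foldl
      (fun m j => min m (max (dp.getD (j - 1) 0) (P.getD i 0 - P.getD (j - 1) 0)))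
      (P.getD i 0))

def iterB (P : List Int) (n : Nat) : Nat → List Int → List Int
  | 0, dp => dp
  | t + 1, dp =>
    let new := stepB P n dp
    if new = dp then dp else iterB P n t new

def autostrada_alt (T : List Int) (k : Int) : Int :=
  let n := T.length
  let P := prefB 0 T
  (iterB P n k.toNat (List.replicate n (10 ^ 10))).getD (n - 1) 0

-- ===== PRECONDITION & SPEC =====
-- A raises IndexError on T = [] (F[-1] on the empty table) and on k < 0 (assignment
-- into the empty row F[i][0]); Pre_ excludes exactly those inputs.
def Pre_autostrada (T : List Int) (k : Int) : Prop := T ≠ [] ∧ 0 ≤ k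
instance (T : List Int) (k : Int) : Decidable (Pre_autostrada T k) := by
  unfold Pre_autostrada; infer_instance

def pvWitness_autostrada : List Int × Int := ([1, 2], 1)

def Spec_autostrada (T : List Int) (k : Int) (out : Int) : Prop := out = autostrada_alt T k
instance (T : List Int) (k : Int) (out : Int) : Decidable (Spec_autostrada T k out) := by
  unfold Spec_autostrada; infer_instance

-- ===== CLAIM (what is proved, stated in full; the proofs are below) =====
def Claim_equal_autostrada : Prop := ∀ (T : List Int) (k : Int),
  Dom_autostrada T k → Pre_autostrada T k → Spec_autostrada T k (autostrada T k)

-- ===== LEMMAS AND PROOFS =====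

-- The common value: g P k i = the value of A's f(F,P,i,k) (and of B's layer-k entry i).
def gDP (P : List Int) : Nat → Nat → Int
  | 0, _ => 10 ^ 10
  | k + 1, i =>
    (List.range' 1 i).foldl
      (fun m j => min m (max (gDP P k (j - 1)) (P.getD i 0 - P.getD (j - 1) 0)))
      (P.getD i 0)

-- Invariant of A's memo table: right lengths, column 0 holds the 10^10 sentinel,
-- and every entry is either -1 (unfilled) or the true DP value.
def InvF (P : List Int) (n cols : Nat) (F : List (List Int)) : Prop :=
  F.length = n ∧
  (∀ i, i < n → (F.getD i []).length = cols) ∧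
  (∀ i, i < n → ∀ kk, (F.getD i []).getD kk (-1) = -1 ∨
      (F.getD i []).getD kk (-1) = gDP P kk i) ∧
  (∀ i, i < n → (F.getD i []).getD 0 (-1) = 10 ^ 10)

lemma getD_set_self {α : Type} (xs : List α) (i : Nat) (h : i < xs.length) (v d : α) :
    (xs.set i v).getD i d = v := by
  simp [List.getD_eq_getElem?_getD, h]

lemma getD_set_ne {α : Type} (xs : List α) (i j : Nat) (h : i ≠ j) (v d : α) :
    (xs.set i v).getD j d = xs.getD j d := by
  simp [List.getD_eq_getElem?_getD, List.getElem?_set_ne h]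

lemma initFA_loop (n cols : Nat) :
    ∀ m, m ≤ n →
      ((List.range m).foldl (fun F i => F.set i ((F.getD i []).set 0 (10 ^ 10)))
          (List.replicate n (List.replicate cols (-1:Int)))).length = n ∧
      ∀ i, i < n →
        ((List.range m).foldl (fun F i => F.set i ((F.getD i []).set 0 (10 ^ 10)))
            (List.replicate n (List.replicate cols (-1:Int)))).getD i [] =
          if i < m then (List.replicate cols (-1:Int)).set 0 (10 ^ 10)
          else List.replicate cols (-1:Int) := by
  intro m
  induction m with
  | zero =>
    intro _
    refine ⟨by simp, ?_⟩
    intro i h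
    simp [List.getD_eq_getElem?_getD, h]
  | succ m ih =>
    intro hm
    obtain ⟨hlen, hget⟩ := ih (by omega)
    rw [List.range_succ, List.foldl_append]
    set L := (List.range m).foldl (fun F i => F.set i ((F.getD i []).set 0 (10 ^ 10)))
        (List.replicate n (List.replicate cols (-1:Int))) with hL
    simp only [List.foldl_cons, List.foldl_nil]
    refine ⟨by rw [List.length_set, hlen], ?_⟩
    intro i h
    by_cases hi : i = m
    · subst hi
      rw [getD_set_self _ _ (by omega) _ _, hget i h, if_neg (by omega), if_pos (by omega)]
    · rw [getD_set_ne _ _ _ (fun he => hi he.symm) _ _, hget i h]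
      by_cases h2 : i < m
      · rw [if_pos h2, if_pos (by omega)]
      · rw [if_neg h2, if_neg (by omega)]

lemma initFA_inv (P : List Int) (n cols : Nat) (hc : 0 < cols) :
    InvF P n cols (initFA n cols) := by
  obtain ⟨hlen, hget⟩ := initFA_loop n cols n le_rfl
  have hrow : ∀ i, i < n → (initFA n cols).getD i [] =
      (List.replicate cols (-1:Int)).set 0 (10 ^ 10) := by
    intro i h
    rw [initFA, hget i h, if_pos h]
  refine ⟨hlen, ?_, ?_, ?_⟩
  · intro i h; rw [hrow i h]; simp
  · intro i h kk
    rw [hrow i h]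
    by_cases hk : kk = 0
    · subst hk
      right
      rw [getD_set_self _ _ (by simpa using hc) _ _]
      rfl
    · left
      rw [getD_set_ne _ _ _ (fun he => hk he.symm) _ _]
      simp [List.getD_eq_getElem?_getD, List.getElem?_replicate]
      split <;> rfl
  · intro i h
    rw [hrow i h, getD_set_self _ _ (by simpa using hc) _ _]

lemma fA_correct (P : List Int) (n cols : Nat) :
    ∀ k, k < cols → ∀ F i, i < n → InvF P n cols F →
      (fA P k F i).1 = gDP P k i ∧ InvF P n cols (fA P k F i).2 := by
  intro k
  induction k with
  | zero =>
    intro _ F i hi hF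
    exact ⟨hF.2.2.2 i hi, hF⟩
  | succ k' ih =>
    intro hk F i hi hF
    have ihk := ih (by omega)
    -- the stateful inner loop
    have loop : ∀ (l : List Nat), (∀ j ∈ l, 1 ≤ j ∧ j ≤ i) → ∀ (m : Int) F',
        InvF P n cols F' →
        ((l.foldl (fun (st : Int × List (List Int)) j =>
            let r := fA P k' st.2 (j - 1)
            (min st.1 (max r.1 (P.getD i 0 - P.getD (j - 1) 0)), r.2)) (m, F')).1 =
          l.foldl (fun m j => min m (max (gDP P k' (j - 1)) (P.getD i 0 - P.getD (j - 1) 0))) m) ∧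
        InvF P n cols ((l.foldl (fun (st : Int × List (List Int)) j =>
            let r := fA P k' st.2 (j - 1)
            (min st.1 (max r.1 (P.getD i 0 - P.getD (j - 1) 0)), r.2)) (m, F')).2) := by
      intro l
      induction l with
      | nil => intro _ m F' hF'; exact ⟨rfl, hF'⟩
      | cons j l ihl =>
        intro hjl m F' hF'
        obtain ⟨hj1, hj2⟩ := hjl j (List.mem_cons_self ..)
        have hj3 : j - 1 < n := by omega
        obtain ⟨hv, hI⟩ := ihk F' (j - 1) hj3 hF'
        simp only [List.foldl_cons]
        have := ihl (fun x hx => hjl x (List.mem_cons_of_mem _ hx))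
          (min m (max (gDP P k' (j - 1)) (P.getD i 0 - P.getD (j - 1) 0)))
          (fA P k' F' (j - 1)).2 hI
        rw [hv]
        exact this
    show ((if ((F.getD i []).getD (k' + 1) (-1)) ≠ -1 then _ else _) : Int × _).1 = _ ∧ _
    by_cases hcur : (F.getD i []).getD (k' + 1) (-1) ≠ -1
    · rcases hF.2.2.1 i hi (k' + 1) with h | h
      · exact absurd h hcur
      · rw [fA, if_pos hcur]
        exact ⟨h, hF⟩
    · rw [fA, if_neg hcur]
      simp only
      obtain ⟨hfst, hinv⟩ := loop (List.range' 1 i)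
        (fun j hj => by rw [List.mem_range'_1] at hj; omega) (P.getD i 0) F hF
      set st := (List.range' 1 i).foldl
        (fun (st : Int × List (List Int)) j =>
          let r := fA P k' st.2 (j - 1)
          (min st.1 (max r.1 (P.getD i 0 - P.getD (j - 1) 0)), r.2)) (P.getD i 0, F) with hst
      have hg : st.1 = gDP P (k' + 1) i := by rw [hfst]; rfl
      have hlen2 : st.2.length = n := hinv.1
      have hrowlen : (st.2.getD i []).length = cols := hinv.2.1 i hi
      have hkc : k' + 1 < (st.2.getD i []).length := by omega
      have hrow2 : (st.2.set i ((st.2.getD i []).set (k' + 1) st.1)).getD i [] =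
          (st.2.getD i []).set (k' + 1) st.1 :=
        getD_set_self _ _ (by omega) _ _
      have hval : ((st.2.set i ((st.2.getD i []).set (k' + 1) st.1)).getD i []).getD (k' + 1) (-1) = st.1 := by
        rw [hrow2, getD_set_self _ _ hkc _ _]
      constructor
      · rw [hval, hg]
      · refine ⟨by rw [List.length_set, hlen2], ?_, ?_, ?_⟩
        · intro i' hi'
          by_cases he : i' = i
          · subst he; rw [hrow2]; simpa using hrowlen
          · rw [getD_set_ne _ _ _ (fun x => he x.symm) _ _]
            exact hinv.2.1 i' hi'
        · intro i' hi' kk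
          by_cases he : i' = i
          · subst he
            rw [hrow2]
            by_cases hkk : kk = k' + 1
            · subst hkk
              right
              rw [getD_set_self _ _ hkc _ _, hg]
            · rw [getD_set_ne _ _ _ (fun x => hkk x.symm) _ _]
              exact hinv.2.2.1 i' hi' kk
          · rw [getD_set_ne _ _ _ (fun x => he x.symm) _ _]
            exact hinv.2.2.1 i' hi' kk
        · intro i' hi'
          by_cases he : i' = i
          · subst he
            rw [hrow2, getD_set_ne _ _ _ (by omega) _ _]
            exact hinv.2.2.2 i' hi'
          · rw [getD_set_ne _ _ _ (fun x => he x.symm) _ _]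
            exact hinv.2.2.2 i' hi'

lemma autostrada_eq_g (T : List Int) (k : Int) (h : Pre_autostrada T k) :
    autostrada T k = gDP (pyPrefixA T) k.toNat (T.length - 1) := by
  have hn : 0 < T.length := List.length_pos_iff.mpr h.1
  exact (fA_correct (pyPrefixA T) T.length (k.toNat + 1) k.toNat (by omega)
    (initFA T.length (k.toNat + 1)) (T.length - 1) (by omega)
    (initFA_inv _ _ _ (by omega))).1

lemma iterB_eq_iterate (P : List Int) (n : Nat) : ∀ (t : Nat) (dp : List Int),
    iterB P n t dp = (stepB P n)^[t] dp := by
  intro t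
  induction t with
  | zero => intro dp; rfl
  | succ t ih =>
    intro dp
    show (if stepB P n dp = dp then dp else iterB P n t (stepB P n dp)) = _
    rw [Function.iterate_succ_apply]
    by_cases h : stepB P n dp = dp
    · rw [if_pos h, h, Function.iterate_fixed h]
    · rw [if_neg h, ih]

lemma getD_stepB (P : List Int) (n : Nat) (dp : List Int) (i : Nat) (h : i < n) :
    (stepB P n dp).getD i 0 =
      (List.range' 1 i).foldl
        (fun m j => min m (max (dp.getD (j - 1) 0) (P.getD i 0 - P.getD (j - 1) 0)))
        (P.getD i 0) := by
  rw [stepB, List.getD_eq_getElem?_getD, List.getElem?_map, List.getElem?_range h]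
  rfl

lemma iterate_stepB_getD (P : List Int) (n : Nat) :
    ∀ t i, i < n → ((stepB P n)^[t] (List.replicate n ((10:Int) ^ 10))).getD i 0 = gDP P t i := by
  intro t
  induction t with
  | zero => intro i h; simp [gDP, h]
  | succ t ih =>
    intro i h
    rw [Function.iterate_succ_apply', getD_stepB _ _ _ _ h]
    show _ = gDP P (t + 1) i
    rw [gDP]
    apply PySem.List.foldl_congr_mem
    intro acc j hj
    rw [List.mem_range'_1] at hj
    rw [ih (j - 1) (by omega)]

lemma prefB_getD (T : List Int) :
    ∀ (s : Int) (i : Nat), i < T.length →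
      (prefB s T).getD i 0 = s + ((T.take (i + 1)).sum) := by
  induction T with
  | nil => intro s i h; simp at h
  | cons x xs ih =>
    intro s i h
    cases i with
    | zero => simp [prefB]
    | succ i =>
      simp only [prefB, List.getD_cons_succ, List.take_succ_cons, List.sum_cons]
      rw [ih (s + x) i (by simpa using h)]
      ring

lemma length_prefB (T : List Int) : ∀ s : Int, (prefB s T).length = T.length := by
  induction T with
  | nil => intro s; rfl
  | cons x xs ih => intro s; simp [prefB, ih]

lemma take_succ_sum (T : List Int) (i : Nat) (h : i < T.length) :
    (T.take (i + 1)).sum = (T.take i).sum + T.getD i 0 := by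
  rw [List.take_add_one, List.sum_append, List.getD_eq_getElem?_getD]
  rw [List.getElem?_eq_getElem h]
  simp

lemma pyA_loop (T : List Int) :
    ∀ m, m + 1 ≤ T.length →
      ((List.range' 1 m).foldl
          (fun acc i => acc.set i (acc.getD i 0 + acc.getD (i - 1) 0)) T).length = T.length ∧
      ∀ i, i < T.length →
        ((List.range' 1 m).foldl
            (fun acc i => acc.set i (acc.getD i 0 + acc.getD (i - 1) 0)) T).getD i 0 =
          if i ≤ m then (T.take (i + 1)).sum else T.getD i 0 := by
  intro m
  induction m with
  | zero =>
    intro _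
    refine ⟨rfl, ?_⟩
    intro i h
    simp only [List.range'_zero, List.foldl_nil]
    split
    · next hi =>
      interval_cases i
      rw [take_succ_sum T 0 h]; simp
    · rfl
  | succ m ih =>
    intro hm
    obtain ⟨hlen, hget⟩ := ih (by omega)
    have hconc : List.range' 1 (m + 1) = List.range' 1 m ++ [1 + 1 * m] := List.range'_concat
    rw [hconc, List.foldl_append]
    set L := (List.range' 1 m).foldl
        (fun acc i => acc.set i (acc.getD i 0 + acc.getD (i - 1) 0)) T with hL
    simp only [List.foldl_cons, List.foldl_nil]
    have h1m : 1 + 1 * m = m + 1 := by omega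
    rw [h1m]
    have hm1 : m + 1 < T.length := by omega
    have hv : L.getD (m + 1) 0 + L.getD (m + 1 - 1) 0 = (T.take (m + 2)).sum := by
      rw [hget (m + 1) hm1]
      have : m + 1 - 1 = m := by omega
      rw [this, hget m (by omega)]
      rw [if_neg (by omega), if_pos (by omega)]
      rw [take_succ_sum T (m+1) hm1]
      ring
    constructor
    · rw [List.length_set, hlen]
    · intro i h
      by_cases hi : i = m + 1
      · subst hi
        rw [getD_set_self _ _ (by omega) _ _, hv, if_pos (by omega)]
      · rw [getD_set_ne _ _ _ (fun he => hi he.symm) _ _, hget i h]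
        by_cases h2 : i ≤ m
        · rw [if_pos h2, if_pos (by omega)]
        · rw [if_neg h2, if_neg (by omega)]

lemma pyPrefixA_eq_prefB (T : List Int) : pyPrefixA T = prefB 0 T := by
  cases T with
  | nil => rfl
  | cons x xs =>
    set T := x :: xs with hT
    have hlen1 : T.length - 1 + 1 ≤ T.length := by simp [hT]
    obtain ⟨hlen, hget⟩ := pyA_loop T (T.length - 1) hlen1
    apply List.ext_getElem
    · rw [pyPrefixA, hlen, length_prefB]
    · intro i h1 h2
      have hiT : i < T.length := by rw [pyPrefixA, hlen] at h1; exact h1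
      have e1 : (pyPrefixA T)[i] = (pyPrefixA T).getD i 0 := by
        rw [List.getD_eq_getElem _ _ h1]
      have e2 : (prefB 0 T)[i] = (prefB 0 T).getD i 0 := by
        rw [List.getD_eq_getElem _ _ h2]
      rw [e1, e2, pyPrefixA, hget i hiT, if_pos (by omega), prefB_getD T 0 i hiT]
      ring

lemma autostrada_alt_eq_g (T : List Int) (k : Int) (h : Pre_autostrada T k) :
    autostrada_alt T k = gDP (prefB 0 T) k.toNat (T.length - 1) := by
  have hn : 0 < T.length := List.length_pos_iff.mpr h.1
  show (iterB (prefB 0 T) T.length k.toNat (List.replicate T.length (10 ^ 10))).getD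
      (T.length - 1) 0 = _
  rw [iterB_eq_iterate, iterate_stepB_getD _ _ _ _ (by omega)]

-- ===== VERDICT (by name: the statement is the Claim_ definition above) =====
theorem autostrada_spec : Claim_equal_autostrada := by
  intro T k _ hpre
  unfold Spec_autostrada
  rw [autostrada_eq_g T k hpre, autostrada_alt_eq_g T k hpre, pyPrefixA_eq_prefB]
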